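-- pv_equiv track=rewrite | github.com/mhossein-shokouhi/Smart-Construction-Monitoring | supervisor.py | trim_conversation
-- ===== SOURCE A (Python) =====
-- def trim_conversation(conversation, max_interactions=5):
--     if not conversation:
--         return conversation
--
--     system = conversation[0]
--     rest = conversation[1:]
--     interactions = []
--     current = []
--
--     def is_user(msg):
--         return isinstance(msg, dict) and msg.get("role") == "user"
--
--     for msg in rest:
--         if is_user(msg):
--             if current:
--                 interactions.append(current)
--             current = [msg]
--         else:
--             current.append(msg)
--
--     if current:
--         interactions.append(current)
--
--     trimmed = interactions[-max_interactions:]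
--
--     flat = [system]
--     for block in trimmed:
--         flat.extend(block)
--     return flat
-- ===== SOURCE B (Python) =====
-- def trim_conversation(conversation, max_interactions=5):
--     if not conversation:
--         return conversation
--
--     system = conversation[0]
--     rest = conversation[1:]
--
--     def is_user(msg):
--         return isinstance(msg, dict) and msg.get("role") == "user"
--
--     # block start indices in one pass: index 0 always starts a block,
--     # and every user message at i > 0 starts a new block
--     starts = ([0] if rest else []) + [i for i, m in enumerate(rest) if i > 0 and is_user(m)]
--     kept = starts[-max_interactions:]
--
--     flat = [system]
--     if kept:
--         flat.extend(rest[kept[0]:])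
--     return flat
-- ===== Notes on version B (the rewrite author's own statement) =====
-- stated objective: simpler
-- what changed: B replaces A's build-blocks-then-slice-then-flatten pipeline by computing the list of block start indices in one enumerate pass, slicing that index list, and returning system plus a single tail slice of rest.
import Mathlib
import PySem

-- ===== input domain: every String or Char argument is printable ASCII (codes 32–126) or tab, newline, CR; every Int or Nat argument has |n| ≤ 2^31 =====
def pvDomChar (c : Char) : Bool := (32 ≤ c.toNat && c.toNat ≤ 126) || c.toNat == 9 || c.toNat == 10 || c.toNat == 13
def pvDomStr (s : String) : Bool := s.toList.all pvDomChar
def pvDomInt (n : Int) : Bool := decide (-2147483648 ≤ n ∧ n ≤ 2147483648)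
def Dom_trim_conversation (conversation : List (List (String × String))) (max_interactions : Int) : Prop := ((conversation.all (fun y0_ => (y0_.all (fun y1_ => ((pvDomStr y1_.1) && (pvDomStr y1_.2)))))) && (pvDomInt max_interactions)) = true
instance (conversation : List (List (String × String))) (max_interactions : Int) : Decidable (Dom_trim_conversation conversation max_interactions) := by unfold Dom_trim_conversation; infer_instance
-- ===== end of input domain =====

-- B replaces A's group-into-blocks-then-slice pass by a one-pass list of block START INDICES,
-- slices that index list and takes one tail of `rest` (objective: simpler; same O(n) cost).

-- ===== PORT A =====
-- is_user(msg): under the type convention msg is always a dict, so isinstance(msg, dict) is True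
def pvIsUser (m : List (String × String)) : Bool :=
  PySem.Dict.get? ⟨m⟩ "role" == some "user"

-- the body of A's `for msg in rest` loop (state = (interactions, current))
def pvStepA (st : List (List (List (String × String))) × List (List (String × String)))
    (msg : List (String × String)) :
    List (List (List (String × String))) × List (List (String × String)) :=
  if pvIsUser msg then
    ((if st.2.isEmpty then st.1 else st.1 ++ [st.2]), [msg])
  else
    (st.1, st.2 ++ [msg])

def trim_conversation (conversation : List (List (String × String))) (max_interactions : Int) :
    List (List (String × String)) :=
  match conversation with
  | [] => conversation
  | system :: rest =>
    let st := rest.foldl pvStepA ([], [])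
    let interactions := if st.2.isEmpty then st.1 else st.1 ++ [st.2]
    let trimmed := PySem.List.slice interactions (some (-max_interactions)) none
    trimmed.foldl (fun acc block => acc ++ block) [system]

-- ===== PORT B =====
def trim_conversation_alt (conversation : List (List (String × String))) (max_interactions : Int) :
    List (List (String × String)) :=
  match conversation with
  | [] => conversation
  | system :: rest =>
    let starts : List Int :=
      (if rest.isEmpty then [] else [0]) ++
        (PySem.List.enumerate rest).filterMap
          (fun p => if decide (p.1 > 0) && pvIsUser p.2 then some p.1 else none)
    let kept := PySem.List.slice starts (some (-max_interactions)) none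
    match kept with
    | [] => [system]
    | k :: _ => system :: PySem.List.slice rest (some k) none

-- ===== PRECONDITION & SPEC =====
def Spec_trim_conversation (conversation : List (List (String × String))) (max_interactions : Int) (out : List (List (String × String))) : Prop := out = trim_conversation_alt conversation max_interactions
instance (conversation : List (List (String × String))) (max_interactions : Int) (out : List (List (String × String))) : Decidable (Spec_trim_conversation conversation max_interactions out) := by unfold Spec_trim_conversation; infer_instance

-- ===== CLAIM (what is proved, stated in full; the proofs are below) =====
def Claim_equal_trim_conversation : Prop := ∀ (conversation : List (List (String × String))) (max_interactions : Int), Dom_trim_conversation conversation max_interactions → Spec_trim_conversation conversation max_interactions (trim_conversation conversation max_interactions)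

-- ===== LEMMAS AND PROOFS =====

-- the grouping A's loop computes, as a structural recursion (current block accumulated in `cur`)
def pvGc (cur : List (List (String × String))) :
    List (List (String × String)) → List (List (List (String × String)))
  | [] => [cur]
  | m :: ms => if pvIsUser m then cur :: pvGc [m] ms else pvGc (cur ++ [m]) ms

-- 0-based indices of the user messages of a list
def pvU : List (List (String × String)) → List Nat
  | [] => []
  | m :: ms => if pvIsUser m then 0 :: (pvU ms).map (· + 1) else (pvU ms).map (· + 1)

theorem pv_getD_map_succ (l : List Nat) (d : Nat) (hd : d < l.length) :
    (l.map (· + 1)).getD d 0 = l.getD d 0 + 1 := by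
  induction l generalizing d with
  | nil => simp at hd
  | cons x l ih =>
    cases d with
    | zero => simp
    | succ e => simpa using ih e (by simpa using hd)

theorem pv_foldA_spec (ms : List (List (String × String)))
    (acc : List (List (List (String × String)))) (cur : List (List (String × String)))
    (hcur : cur ≠ []) :
    (if (ms.foldl pvStepA (acc, cur)).2.isEmpty then (ms.foldl pvStepA (acc, cur)).1
      else (ms.foldl pvStepA (acc, cur)).1 ++ [(ms.foldl pvStepA (acc, cur)).2])
      = acc ++ pvGc cur ms := by
  induction ms generalizing acc cur with
  | nil => simp [pvGc, List.isEmpty_iff, hcur]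
  | cons m ms ih =>
    have hce : cur.isEmpty = false := by simpa [List.isEmpty_iff] using hcur
    by_cases h : pvIsUser m
    · simp only [List.foldl_cons, pvStepA, h, if_true, hce, Bool.false_eq_true, if_false, pvGc]
      rw [ih (acc ++ [cur]) [m] (by simp)]
      simp
    · simp only [List.foldl_cons, pvStepA, h, Bool.false_eq_true, if_false, pvGc]
      exact ih acc (cur ++ [m]) (by simp)

theorem pv_len_Gc (ms : List (List (String × String))) (cur : List (List (String × String))) :
    (pvGc cur ms).length = (pvU ms).length + 1 := by
  induction ms generalizing cur with
  | nil => simp [pvGc, pvU]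
  | cons m ms ih =>
    by_cases h : pvIsUser m <;> simp [pvGc, pvU, h, ih]

theorem pv_flatten_Gc (ms : List (List (String × String))) (cur : List (List (String × String))) :
    (pvGc cur ms).flatten = cur ++ ms := by
  induction ms generalizing cur with
  | nil => simp [pvGc]
  | cons m ms ih =>
    by_cases h : pvIsUser m <;> simp [pvGc, h, ih]

theorem pv_flatten_drop_Gc (ms : List (List (String × String)))
    (cur : List (List (String × String))) :
    ∀ d, d < (pvU ms).length →
      ((pvGc cur ms).drop (d + 1)).flatten = ms.drop ((pvU ms).getD d 0) := by
  induction ms generalizing cur with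
  | nil => intro d hd; simp [pvU] at hd
  | cons m ms ih =>
    intro d hd
    by_cases h : pvIsUser m
    · simp only [pvGc, pvU, h, if_true] at hd ⊢
      cases d with
      | zero => simpa using pv_flatten_Gc ms [m]
      | succ e =>
        have he : e < (pvU ms).length := by simpa using hd
        simp only [List.drop_succ_cons, List.getD_cons_succ]
        rw [pv_getD_map_succ _ _ he, ih [m] e he]
        simp
    · simp only [pvGc, pvU, h, Bool.false_eq_true, if_false] at hd ⊢
      have he : d < (pvU ms).length := by simpa using hd
      rw [pv_getD_map_succ _ _ he, ih (cur ++ [m]) d he]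
      simp

theorem pv_foldl_append_init (L : List (List (List (String × String))))
    (a : List (List (String × String))) :
    L.foldl (fun acc block => acc ++ block) a = a ++ L.flatten := by
  induction L generalizing a with
  | nil => simp
  | cons x L ih => simp [ih, List.append_assoc]

-- B's filterMap over enumerate computes exactly the user indices (shifted by the start offset)
theorem pv_filterMap_enumerate (ms : List (List (String × String))) (s : Int) (hs : 1 ≤ s) :
    (PySem.List.enumerate ms s).filterMap
        (fun p => if decide (p.1 > 0) && pvIsUser p.2 then some p.1 else none)
      = (pvU ms).map (fun (k : Nat) => s + (k : Int)) := by
  induction ms generalizing s with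
  | nil => simp [PySem.List.enumerate_nil, pvU]
  | cons m ms ih =>
    rw [PySem.List.enumerate_cons]
    have hs0 : decide ((s : Int) > 0) = true := by simp; omega
    rw [List.filterMap_cons, ih (s + 1) (by omega)]
    by_cases h : pvIsUser m
    · simp only [h, hs0, Bool.and_self, if_true, pvU, List.map_cons, List.map_map,
        Nat.cast_zero, add_zero]
      congr 1
      apply List.map_congr_left
      intro a _
      simp only [Function.comp_apply]
      push_cast
      ring
    · simp only [h, Bool.and_false, Bool.false_eq_true, if_false, pvU, List.map_map]
      apply List.map_congr_left
      intro a _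
      simp only [Function.comp_apply]
      push_cast
      ring

theorem pv_drop_map_getD (f : Nat → Int) :
    ∀ (l : List Nat) (d : Nat), d < l.length →
      (l.map f).drop d = f (l.getD d 0) :: (l.map f).drop (d + 1) := by
  intro l
  induction l with
  | nil => intro d hd; simp at hd
  | cons x l ih =>
    intro d hd
    cases d with
    | zero => simp
    | succ e =>
      simp only [List.map_cons, List.drop_succ_cons, List.getD_cons_succ]
      exact ih e (by simpa using hd)

theorem trim_conversation_spec : Claim_equal_trim_conversation := by
  unfold Claim_equal_trim_conversation
  intro conversation max_interactions _
  unfold Spec_trim_conversation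
  match conversation with
  | [] => rfl
  | system :: rest =>
    simp only [trim_conversation, trim_conversation_alt]
    match rest with
    | [] =>
      simp [PySem.List.slice_some_none, PySem.List.enumerate_nil]
    | m :: ms =>
      -- A's state after the first message is ([], [m]) regardless of the branch
      have hfirst : (m :: ms).foldl pvStepA ([], []) = ms.foldl pvStepA ([], [m]) := by
        by_cases h : pvIsUser m <;> simp [pvStepA, h]
      rw [hfirst]
      rw [pv_foldA_spec ms [] [m] (by simp), List.nil_append]
      -- B's starts list
      have hstarts : ((if (m :: ms).isEmpty then ([] : List Int) else [0]) ++
          (PySem.List.enumerate (m :: ms) 0).filterMap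
            (fun p => if decide (p.1 > 0) && pvIsUser p.2 then some p.1 else none))
          = (0 : Int) :: (pvU ms).map (fun (k : Nat) => 1 + (k : Int)) := by
        rw [PySem.List.enumerate_cons]
        simp only [List.isEmpty_cons, Bool.false_eq_true, if_false, List.filterMap_cons]
        rw [pv_filterMap_enumerate ms (0 + 1) (by omega)]
        norm_num
      rw [hstarts]
      rw [PySem.List.slice_some_none, PySem.List.slice_some_none]
      have hlen : ((0 : Int) :: (pvU ms).map (fun (k : Nat) => 1 + (k : Int))).length
          = (pvGc [m] ms).length := by
        simp [pv_len_Gc]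
      rw [hlen]
      set d := PySem.List.clampIdx (pvGc [m] ms).length (-max_interactions) with hd
      rw [pv_foldl_append_init]
      cases hD : d with
      | zero =>
        simp only [List.drop_zero]
        rw [pv_flatten_Gc]
        simp [PySem.List.slice_some_none, PySem.List.clampIdx]
      | succ e =>
        by_cases he : e < (pvU ms).length
        · have hdrop : ((0 : Int) :: (pvU ms).map (fun (k : Nat) => 1 + (k : Int))).drop (e + 1)
              = (1 + ((pvU ms).getD e 0 : Int)) :: ((pvU ms).map (fun (k : Nat) => 1 + (k : Int))).drop (e + 1) := by
            rw [List.drop_succ_cons]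
            exact pv_drop_map_getD _ (pvU ms) e he
          rw [hdrop, pv_flatten_drop_Gc ms [m] e he]
          have h1 : (1 + ((pvU ms).getD e 0 : Int)) = (((1 + (pvU ms).getD e 0 : Nat)) : Int) := by
            push_cast; ring
          rw [h1]
          simp only [PySem.List.slice_from_natCast]
          simp
          generalize (pvU ms)[e]?.getD 0 = u
          rw [Nat.add_comm, List.drop_succ_cons]
        · -- d ≥ length: both sides empty
          have hge : (pvU ms).length + 1 ≤ e + 1 := by omega
          have hdropG : (pvGc [m] ms).drop (e + 1) = [] := by
            apply List.drop_eq_nil_of_le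
            rw [pv_len_Gc]; omega
          have hdropS : ((0 : Int) :: (pvU ms).map (fun (k : Nat) => 1 + (k : Int))).drop (e + 1) = [] := by
            apply List.drop_eq_nil_of_le
            simp; omega
          rw [hdropG, hdropS]
          simp
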